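-- pv_equiv track=rewrite | github.com/mr8bit/ouroboros-desktop | ouroboros/contracts/skill_manifest.py | _bracket_depth
-- ===== SOURCE A (Python) =====
-- def _bracket_depth(text: str) -> int:
--     """Rough bracket/brace depth change — ignoring strings is fine for
--     skill manifests since the YAML flow blocks in OpenClaw format
--     don't contain unescaped quotes that would mess up the count."""
--     depth = 0
--     for ch in text:
--         if ch in "{[":
--             depth += 1
--         elif ch in "}]":
--             depth -= 1
--     return depth
-- ===== SOURCE B (Python) =====
-- _TABLE = {'{': 1, '[': 1, '}': -1, ']': -1}
--
-- def _bracket_depth(text: str) -> int: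
--     # Divide and conquer: the net depth change of a string is the sum of the
--     # net changes of its halves; single characters are scored via a table.
--     def go(lo: int, hi: int) -> int:
--         if hi <= lo:
--             return 0
--         if hi == lo + 1:
--             return _TABLE.get(text[lo], 0)
--         mid = (lo + hi) // 2
--         return go(lo, mid) + go(mid, hi)
--     return go(0, len(text))
-- ===== Notes on version B (the rewrite author's own statement) =====
-- stated objective: alternative
-- what changed: Replaced the left-to-right accumulator loop with a divide-and-conquer recursion: the string is split in half, each half scored recursively (single characters via a lookup table), and the two results summed; correctness rests on additivity of the net depth change over concatenation.
import Mathlib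
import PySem

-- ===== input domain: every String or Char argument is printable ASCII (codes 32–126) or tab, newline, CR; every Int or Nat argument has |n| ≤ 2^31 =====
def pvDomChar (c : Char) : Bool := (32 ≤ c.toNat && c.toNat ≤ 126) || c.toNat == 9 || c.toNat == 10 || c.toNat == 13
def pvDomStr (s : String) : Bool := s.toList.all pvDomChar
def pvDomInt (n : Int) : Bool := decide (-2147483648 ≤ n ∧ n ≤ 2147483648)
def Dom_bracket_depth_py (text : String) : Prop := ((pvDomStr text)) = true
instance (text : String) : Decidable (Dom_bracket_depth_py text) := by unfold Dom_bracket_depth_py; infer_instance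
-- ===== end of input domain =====

-- B replaces A's left-to-right accumulator loop with a divide-and-conquer recursion over
-- index halves (single characters scored by a lookup table); same cost, different decomposition.

-- ===== PORT A =====
def bracket_depth_py (text : String) : Int :=
  text.toList.foldl
    (fun depth ch =>
      if ch ∈ "{[".toList then depth + 1
      else if ch ∈ "}]".toList then depth - 1
      else depth) 0

-- ===== PORT B =====
-- _TABLE = {'{': 1, '[': 1, '}': -1, ']': -1}
def pvTable : PySem.Dict Char Int :=
  PySem.Dict.ofList [('{', 1), ('[', 1), ('}', -1), (']', -1)]

-- go(lo, hi); indices are Nat since go is only called with 0 ≤ lo ≤ hi ≤ len(text).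
-- text[lo] is always in range there, so l.getD lo ' ' is exact for it.
def bracketGo (l : List Char) (lo hi : Nat) : Int :=
  if hi ≤ lo then 0
  else if hi = lo + 1 then pvTable.getD (l.getD lo ' ') 0
  else
    let mid := (lo + hi) / 2
    bracketGo l lo mid + bracketGo l mid hi
termination_by hi - lo
decreasing_by all_goals omega

def bracket_depth_py_alt (text : String) : Int :=
  bracketGo text.toList 0 text.toList.length

-- ===== PRECONDITION & SPEC =====
def Spec_bracket_depth_py (text : String) (out : Int) : Prop := out = bracket_depth_py_alt text
instance (text : String) (out : Int) : Decidable (Spec_bracket_depth_py text out) := by unfold Spec_bracket_depth_py; infer_instance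

-- ===== CLAIM (what is proved, stated in full; the proofs are below) =====
def Claim_equal_bracket_depth_py : Prop := ∀ (text : String), Dom_bracket_depth_py text → Spec_bracket_depth_py text (bracket_depth_py text)

-- ===== LEMMAS AND PROOFS =====

-- per-character score: A's branch chain equals B's table lookup
theorem branch_eq_table (c : Char) :
    (if c ∈ "{[".toList then (1 : Int)
     else if c ∈ "}]".toList then -1 else 0) = pvTable.getD c 0 := by
  by_cases h1 : c = '{'
  · subst h1; decide
  · by_cases h2 : c = '['
    · subst h2; decide
    · by_cases h3 : c = '}'
      · subst h3; decide
      · by_cases h4 : c = ']'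
        · subst h4; decide
        · have hfind : List.find? (fun p : Char × Int => p.1 == c)
              [('{', 1), ('[', 1), ('}', -1), (']', -1)] = none := by
            rw [List.find?_eq_none]
            intro p hp
            fin_cases hp <;> simp only [beq_iff_eq] <;> intro h <;>
              first | exact h1 h.symm | exact h2 h.symm | exact h3 h.symm | exact h4 h.symm
          simp [h1, h2, h3, h4, pvTable, PySem.Dict.ofList, PySem.Dict.update,
            PySem.Dict.insert, PySem.Dict.getD, PySem.Dict.get?, PySem.Dict.empty,
            PySem.Dict.contains, hfind]

-- A's loop is the table-weight sum
theorem foldl_eq_weight_sum (l : List Char) (d : Int) :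
    l.foldl
      (fun depth ch =>
        if ch ∈ "{[".toList then depth + 1
        else if ch ∈ "}]".toList then depth - 1
        else depth) d
    = d + (l.map (fun c => pvTable.getD c 0)).sum := by
  induction l generalizing d with
  | nil => simp
  | cons c t ih =>
    simp only [List.foldl_cons, List.map_cons, List.sum_cons, ih]
    rw [← branch_eq_table c]
    split_ifs <;> ring

-- B's recursion computes the table-weight sum of the index segment
theorem bracketGo_eq_sum (l : List Char) :
    ∀ n lo hi, hi - lo = n → hi ≤ l.length →
      bracketGo l lo hi = (((l.drop lo).take (hi - lo)).map (fun c => pvTable.getD c 0)).sum := by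
  intro n
  induction n using Nat.strong_induction_on with
  | _ n ih =>
    intro lo hi hn hle
    rw [bracketGo]
    by_cases hba : hi ≤ lo
    · simp [hba, Nat.sub_eq_zero_of_le hba]
    · by_cases hone : hi = lo + 1
      · subst hone
        rw [if_neg hba, if_pos rfl]
        have hlt : lo < l.length := by omega
        rw [List.drop_eq_getElem_cons hlt]
        simp only [Nat.add_sub_cancel_left, List.take_succ_cons, List.take_zero,
          List.map_cons, List.map_nil, List.sum_cons, List.sum_nil, add_zero]
        rw [List.getD_eq_getElem?_getD, List.getElem?_eq_getElem hlt]
        rfl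
      · simp only [if_neg hba, if_neg hone]
        rw [ih ((lo + hi) / 2 - lo) (by omega) lo ((lo + hi) / 2) rfl (by omega),
            ih (hi - (lo + hi) / 2) (by omega) ((lo + hi) / 2) hi rfl hle]
        have hsplit : hi - lo = ((lo + hi) / 2 - lo) + (hi - (lo + hi) / 2) := by omega
        have e2 : (l.drop lo).drop ((lo + hi) / 2 - lo) = l.drop ((lo + hi) / 2) := by
          rw [List.drop_drop]; congr 1; omega
        rw [hsplit, List.take_add, e2, List.map_append, List.sum_append]

-- ===== VERDICT (by name: the statement is the Claim_ definition above) =====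
theorem bracket_depth_py_spec : Claim_equal_bracket_depth_py := by
  intro text _
  unfold Spec_bracket_depth_py bracket_depth_py bracket_depth_py_alt
  rw [foldl_eq_weight_sum,
      bracketGo_eq_sum text.toList (text.toList.length - 0) 0 text.toList.length rfl le_rfl]
  have h : (text.toList.drop 0).take (text.toList.length - 0) = text.toList := by simp
  rw [h]
  exact zero_add _
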